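-- pv_equiv track=rewrite | github.com/swift-man/air-korea-mcp-py | src/air_korea_mcp/location_resolution.py | intersect_candidates
-- ===== SOURCE A (Python) =====
-- from typing import Dict, Iterable, List, Sequence, Set
--
-- def intersect_candidates(candidate_lists: Iterable[Sequence[str]]) -> List[str]:
--     iterator = iter(candidate_lists)
--     try:
--         shared: Set[str] = set(next(iterator))
--     except StopIteration:
--         return []
--
--     for candidates in iterator:
--         shared.intersection_update(candidates)
--     return sorted(shared)
-- ===== SOURCE B (Python) =====
-- def intersect_candidates(candidate_lists):
--     counts = {}
--     total = 0
--     for candidates in candidate_lists: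
--         total += 1
--         for c in set(candidates):
--             counts[c] = counts.get(c, 0) + 1
--     if total == 0:
--         return []
--     return sorted(c for c, n in counts.items() if n == total)
-- ===== Notes on version B (the rewrite author's own statement) =====
-- stated objective: alternative
-- what changed: Replaces the shrinking running-set intersection (set of the first list, then intersection_update per remaining list) with a single accumulation pass building a frequency table of per-list occurrences (dedup each list first) plus a list counter, then filters elements whose count equals the number of lists and sorts.
import Mathlib
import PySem

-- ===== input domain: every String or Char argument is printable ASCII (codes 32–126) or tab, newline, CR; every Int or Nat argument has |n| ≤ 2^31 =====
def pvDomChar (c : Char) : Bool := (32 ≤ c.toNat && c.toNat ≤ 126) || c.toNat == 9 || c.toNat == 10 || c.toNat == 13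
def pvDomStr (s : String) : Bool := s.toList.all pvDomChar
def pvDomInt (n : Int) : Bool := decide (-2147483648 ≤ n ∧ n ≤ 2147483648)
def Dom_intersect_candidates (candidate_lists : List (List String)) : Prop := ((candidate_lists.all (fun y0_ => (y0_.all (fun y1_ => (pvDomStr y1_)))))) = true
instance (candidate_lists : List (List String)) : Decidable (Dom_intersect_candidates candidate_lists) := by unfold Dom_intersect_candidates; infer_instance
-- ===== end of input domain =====

-- B replaces the shrinking running-set intersection with one accumulation pass building a
-- per-element list-occurrence counter, then filters elements present in every list and sorts
-- (objective: alternative decomposition, same cost).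

-- ===== PORT A =====
def intersect_candidates (candidate_lists : List (List String)) : List String :=
  match candidate_lists with
  | [] => []                                  -- next(iterator) raises StopIteration → return []
  | first :: rest =>
    let shared := rest.foldl (fun s candidates => PySem.Set.inter s candidates)
      (PySem.Set.ofList first)
    PySem.List.sorted shared (fun x => x) false

-- ===== PORT B =====
def intersect_candidates_alt (candidate_lists : List (List String)) : List String :=
  let st := candidate_lists.foldl
    (fun (st : PySem.Dict String Int × Int) candidates =>
      ((PySem.Set.ofList candidates).foldl (fun d c => d.modify c 0 (· + 1)) st.1, st.2 + 1))
    (PySem.Dict.empty, 0)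
  if st.2 = 0 then []
  else PySem.List.sorted ((st.1.items.filter (fun p => p.2 == st.2)).map Prod.fst)
    (fun x => x) false

-- ===== PRECONDITION & SPEC =====
def Spec_intersect_candidates (candidate_lists : List (List String)) (out : List String) : Prop := out = intersect_candidates_alt candidate_lists
instance (candidate_lists : List (List String)) (out : List String) : Decidable (Spec_intersect_candidates candidate_lists out) := by unfold Spec_intersect_candidates; infer_instance

-- ===== CLAIM (what is proved, stated in full; the proofs are below) =====
def Claim_equal_intersect_candidates : Prop := ∀ (candidate_lists : List (List String)), Dom_intersect_candidates candidate_lists → Spec_intersect_candidates candidate_lists (intersect_candidates candidate_lists)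

-- ===== LEMMAS AND PROOFS =====

-- A-side: the intersection fold keeps nodup and has the expected membership.
theorem foldl_inter_nodup (rest : List (List String)) (s : PySem.Set String)
    (hs : s.Nodup) :
    (rest.foldl (fun s candidates => PySem.Set.inter s candidates) s).Nodup := by
  induction rest generalizing s with
  | nil => exact hs
  | cons cs rest ih => exact ih _ (PySem.Set.nodup_inter _ _ hs)

theorem mem_foldl_inter (rest : List (List String)) (s : PySem.Set String) (x : String) :
    x ∈ rest.foldl (fun s candidates => PySem.Set.inter s candidates) s ↔
      x ∈ s ∧ ∀ cs ∈ rest, x ∈ cs := by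
  induction rest generalizing s with
  | nil => simp
  | cons cs rest ih =>
    simp only [List.foldl_cons, ih, PySem.Set.mem_inter, List.mem_cons]
    constructor
    · rintro ⟨⟨hx, hc⟩, hall⟩
      exact ⟨hx, fun c hc' => hc'.elim (fun h => h ▸ hc) (hall c)⟩
    · rintro ⟨hx, hall⟩
      exact ⟨⟨hx, hall cs (Or.inl rfl)⟩, fun c hc' => hall c (Or.inr hc')⟩

-- B-side: the pair-fold splits into the dict fold and the length counter.
theorem fold_split (l : List (List String)) (d : PySem.Dict String Int) (t : Int) :
    l.foldl
      (fun (st : PySem.Dict String Int × Int) candidates =>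
        ((PySem.Set.ofList candidates).foldl (fun d c => d.modify c 0 (· + 1)) st.1, st.2 + 1))
      (d, t) =
    (l.foldl (fun d candidates =>
        (PySem.Set.ofList candidates).foldl (fun d c => d.modify c 0 (· + 1)) d) d,
      t + l.length) := by
  induction l generalizing d t with
  | nil => simp
  | cons cs l ih => simp [ih]; ring

-- The nested dict fold is the counter of the concatenated deduped lists.
theorem fold_counter (l : List (List String)) (d : PySem.Dict String Int) :
    l.foldl (fun d candidates =>
        (PySem.Set.ofList candidates).foldl (fun d c => d.modify c 0 (· + 1)) d) d =
      (l.flatMap (fun cs => PySem.Set.ofList cs)).foldl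
        (fun d c => d.modify c 0 (· + 1)) d := by
  induction l generalizing d with
  | nil => simp
  | cons cs l ih => simp [List.foldl_append, ih]

-- counting in the concatenation of deduped lists = number of lists containing the element
theorem count_flatMap_ofList (l : List (List String)) (k : String) :
    (l.flatMap (fun cs => PySem.Set.ofList cs)).count k =
      l.countP (fun cs => decide (k ∈ cs)) := by
  induction l with
  | nil => rfl
  | cons cs l ih =>
    simp only [List.flatMap_cons, List.count_append, List.countP_cons, ih]
    by_cases h : k ∈ cs
    · have : (PySem.Set.ofList cs).count k = 1 :=
        List.count_eq_one_of_mem (PySem.Set.nodup_ofList cs) (by simpa [PySem.Set.mem_ofList])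
      simp [h]
      omega
    · have : (PySem.Set.ofList cs).count k = 0 :=
        List.count_eq_zero_of_not_mem (by simpa [PySem.Set.mem_ofList])
      simp [this, h]

-- pull the key out of the filtered items list
theorem map_fst_filter_snd (g : String → Int) (xs : List String) (n : Int) :
    ((xs.map (fun k => (k, g k))).filter (fun p => p.2 == n)).map Prod.fst
      = xs.filter (fun k => g k == n) := by
  induction xs with
  | nil => rfl
  | cons x xs ih =>
    by_cases h : g x == n
    · simp [h, ih]
    · simp only [List.map_cons, List.filter_cons]
      simp [h, ih]

theorem intersect_candidates_eq (first : List String) (rest : List (List String)) :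
    intersect_candidates (first :: rest) = intersect_candidates_alt (first :: rest) := by
  unfold intersect_candidates intersect_candidates_alt
  rw [fold_split, fold_counter]
  have hne : (0 : Int) + (((first :: rest) : List (List String)).length : Int) ≠ 0 := by
    simp only [List.length_cons]
    push_cast
    omega
  rw [if_neg hne]
  rw [show ((first :: rest).flatMap (fun cs => PySem.Set.ofList cs)).foldl
      (fun d c => d.modify c 0 (· + 1)) PySem.Dict.empty =
      PySem.Dict.counter ((first :: rest).flatMap (fun cs => PySem.Set.ofList cs)) from rfl]
  rw [PySem.Dict.items_counter, map_fst_filter_snd]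
  apply PySem.List.sorted_eq_sorted_of_perm _ _ _ (fun a b h => h)
  rw [List.perm_ext_iff_of_nodup
    (foldl_inter_nodup rest _ (PySem.Set.nodup_ofList first))
    ((PySem.Set.nodup_ofList _).filter _)]
  intro k
  simp only [mem_foldl_inter, PySem.Set.mem_ofList, List.mem_filter, count_flatMap_ofList]
  constructor
  · rintro ⟨hfirst, hall⟩
    have hlen : (first :: rest).countP (fun cs => decide (k ∈ cs)) = (first :: rest).length := by
      rw [List.countP_eq_length]
      intro cs hcs
      rcases List.mem_cons.mp hcs with h | h
      · exact decide_eq_true (h ▸ hfirst)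
      · exact decide_eq_true (hall cs h)
    refine ⟨List.mem_flatMap.mpr ⟨first, by simp, (PySem.Set.mem_ofList _ _).mpr hfirst⟩, ?_⟩
    rw [hlen]
    simp
  · rintro ⟨hmem, hcnt⟩
    have hcnt2 : ((first :: rest).countP (fun cs => decide (k ∈ cs)) : Int)
        = 0 + ((first :: rest).length : Int) := beq_iff_eq.mp hcnt
    have hcnt3 : (first :: rest).countP (fun cs => decide (k ∈ cs)) = (first :: rest).length := by
      omega
    have hall : ∀ cs ∈ first :: rest, k ∈ cs := fun cs hcs =>
      of_decide_eq_true (List.countP_eq_length.mp hcnt3 cs hcs)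
    exact ⟨hall first (by simp), fun cs hcs => hall cs (by simp [hcs])⟩

-- ===== VERDICT (by name: the statement is the Claim_ definition above) =====
theorem intersect_candidates_spec : Claim_equal_intersect_candidates := by
  intro cls _
  unfold Spec_intersect_candidates
  match cls with
  | [] => rfl
  | first :: rest => exact intersect_candidates_eq first rest
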